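-- pv_equiv track=rewrite | github.com/Rohit3986/Elevator-Management-System | myapp/helper.py | arrange_requests
-- ===== SOURCE A (Python) =====
-- def arrange_requests(requested_floors,current_floor):
--     requested_floors_sorted = sorted(requested_floors)
--     upword_floors = []
--     downword_floors = []
--     arranged_floor_request = []
--     for x in requested_floors_sorted:
--         if x<current_floor:
--             downword_floors.append(x)
--         if x>current_floor:
--             upword_floors.append(x)
--     if current_floor in requested_floors:
--         arranged_floor_request = [current_floor]
--     if len(upword_floors)>len(downword_floors):
--         arranged_floor_request.extend(upword_floors)
--         arranged_floor_request.extend(downword_floors[::-1])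
--     else:
--         arranged_floor_request.extend(downword_floors[::-1])
--         arranged_floor_request.extend(upword_floors)
--     return arranged_floor_request
-- ===== SOURCE B (Python) =====
-- def arrange_requests(requested_floors, current_floor):
--     n_up = sum(1 for f in requested_floors if f > current_floor)
--     n_down = sum(1 for f in requested_floors if f < current_floor)
--     up_rank, down_rank = (1, 2) if n_up > n_down else (2, 1)
--
--     def key(f):
--         if f == current_floor:
--             return (0, 0)
--         if f > current_floor:
--             return (up_rank, f)
--         return (down_rank, -f)
--
--     pool = [f for f in requested_floors if f != current_floor]
--     if current_floor in requested_floors: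
--         pool.append(current_floor)
--     return sorted(pool, key=key)
-- ===== Notes on version B (the rewrite author's own statement) =====
-- stated objective: alternative
-- what changed: B does a single sort of the pivot-deduplicated request list under one composite (group-rank, signed value) key that encodes the whole output order, instead of A's sort-everything, partition into up/down lists, reverse the down slice and concatenate.
import Mathlib
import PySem

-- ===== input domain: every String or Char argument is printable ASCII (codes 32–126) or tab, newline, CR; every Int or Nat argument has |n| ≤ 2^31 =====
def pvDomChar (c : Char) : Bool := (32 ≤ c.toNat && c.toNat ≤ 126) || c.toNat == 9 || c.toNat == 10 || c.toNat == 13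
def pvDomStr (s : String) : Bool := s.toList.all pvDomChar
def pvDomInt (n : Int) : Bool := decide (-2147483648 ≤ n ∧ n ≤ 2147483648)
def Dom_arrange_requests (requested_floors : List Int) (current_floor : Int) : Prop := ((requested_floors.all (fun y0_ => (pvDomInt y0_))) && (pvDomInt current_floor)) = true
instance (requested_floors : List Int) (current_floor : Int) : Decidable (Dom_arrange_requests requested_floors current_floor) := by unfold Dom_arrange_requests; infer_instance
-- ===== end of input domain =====

-- B change (alternative): one sort of the pivot-deduplicated request list under a composite
-- (group-rank, signed value) key encoding the whole output order, instead of A's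
-- sort-everything, partition, reverse the down slice and concatenate.

-- ===== PORT A =====
def arrange_requests (requested_floors : List Int) (current_floor : Int) : List Int :=
  let requested_floors_sorted := PySem.List.sorted requested_floors (fun x => x) false
  -- the for-loop appending to downword_floors / upword_floors, as a foldl over the pair state
  let du := requested_floors_sorted.foldl
      (fun (acc : List Int × List Int) x =>
        let acc := if x < current_floor then (acc.1 ++ [x], acc.2) else acc
        if x > current_floor then (acc.1, acc.2 ++ [x]) else acc) ([], [])
  let downword_floors := du.1
  let upword_floors := du.2
  let arranged_floor_request := if requested_floors.contains current_floor then [current_floor] else []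
  -- downword_floors[::-1] is slice? with step -1 (total here, hence getD)
  if upword_floors.length > downword_floors.length then
    arranged_floor_request ++ upword_floors ++ ((PySem.List.slice? downword_floors none none (-1)).getD [])
  else
    arranged_floor_request ++ ((PySem.List.slice? downword_floors none none (-1)).getD []) ++ upword_floors

-- ===== PORT B =====
-- Python B's `key(f)` closure, split into its two tuple components for sorted2
def pvRank (cf ur dr f : Int) : Int := if f = cf then 0 else if f > cf then ur else dr
def pvVal (cf f : Int) : Int := if f = cf then 0 else if f > cf then f else -f

def arrange_requests_alt (requested_floors : List Int) (current_floor : Int) : List Int :=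
  let n_up := requested_floors.foldl (fun acc f => if f > current_floor then acc + 1 else acc) (0 : Int)
  let n_down := requested_floors.foldl (fun acc f => if f < current_floor then acc + 1 else acc) (0 : Int)
  let ranks : Int × Int := if n_up > n_down then (1, 2) else (2, 1)
  let pool := requested_floors.filter (fun f => decide (f ≠ current_floor))
  let pool := if requested_floors.contains current_floor then pool ++ [current_floor] else pool
  PySem.List.sorted2 pool (pvRank current_floor ranks.1 ranks.2) (pvVal current_floor) false

-- ===== PRECONDITION & SPEC =====
def Spec_arrange_requests (requested_floors : List Int) (current_floor : Int) (out : List Int) : Prop := out = arrange_requests_alt requested_floors current_floor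
instance (requested_floors : List Int) (current_floor : Int) (out : List Int) : Decidable (Spec_arrange_requests requested_floors current_floor out) := by unfold Spec_arrange_requests; infer_instance

-- ===== CLAIM (what is proved, stated in full; the proofs are below) =====
def Claim_equal_arrange_requests : Prop := ∀ (requested_floors : List Int) (current_floor : Int), Dom_arrange_requests requested_floors current_floor → Spec_arrange_requests requested_floors current_floor (arrange_requests requested_floors current_floor)

-- ===== LEMMAS AND PROOFS =====

-- A's partition loop collects exactly the filtered elements, in order
theorem pv_loop_eq (cf : Int) : ∀ (s : List Int) (d u : List Int),
    s.foldl (fun (acc : List Int × List Int) x =>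
        let acc := if x < cf then (acc.1 ++ [x], acc.2) else acc
        if x > cf then (acc.1, acc.2 ++ [x]) else acc) (d, u)
      = (d ++ s.filter (fun x => decide (x < cf)), u ++ s.filter (fun x => decide (cf < x))) := by
  intro s
  induction s with
  | nil => intro d u; simp
  | cons x t ih =>
    intro d u
    by_cases h1 : x < cf
    · have h2 : ¬ x > cf := by omega
      simp [List.foldl_cons, h1, h2, ih]
    · by_cases h2 : x > cf
      · simp [List.foldl_cons, h1, h2, ih]
      · have hx : x = cf := by omega
        simp [List.foldl_cons, ih, hx]

-- the counting generator sums are filter lengths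
theorem pv_count_eq (p : Int → Prop) [DecidablePred p] : ∀ (l : List Int) (a : Int),
    l.foldl (fun acc f => if p f then acc + 1 else acc) a
      = a + ((l.filter (fun f => decide (p f))).length : Int) := by
  intro l
  induction l with
  | nil => intro a; simp
  | cons x t ih =>
    intro a
    by_cases h : p x
    · simp [h, ih]; omega
    · simp [h, ih]

-- insertBy unfolded on a cons cell
theorem pv_insertBy_cons {α : Type} (before : α → α → Bool) (x y : α) (t : List α) :
    PySem.List.insertBy before x (y :: t)
      = if before x y then x :: y :: t else y :: PySem.List.insertBy before x t := rfl

-- sorted2's comparator, named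
def pvLt (k1 k2 : Int → Int) (a b : Int) : Bool :=
  decide (k1 a < k1 b) || (!decide (k1 b < k1 a) && decide (k2 a < k2 b))

theorem pv_sorted2_eq_foldl (xs : List Int) (k1 k2 : Int → Int) :
    PySem.List.sorted2 xs k1 k2 false
      = xs.foldl (fun acc x => PySem.List.insertBy (pvLt k1 k2) x acc) [] := rfl

theorem pvLt_iff (k1 k2 : Int → Int) (a b : Int) :
    pvLt k1 k2 a b = true ↔ (k1 a < k1 b ∨ (k1 a = k1 b ∧ k2 a < k2 b)) := by
  simp only [pvLt, Bool.or_eq_true, Bool.and_eq_true, Bool.not_eq_true',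
    decide_eq_true_eq, decide_eq_false_iff_not, Int.not_lt]
  omega

theorem pvLt_false_iff (k1 k2 : Int → Int) (a b : Int) :
    pvLt k1 k2 b a = false ↔ (k1 a < k1 b ∨ (k1 a = k1 b ∧ k2 a ≤ k2 b)) := by
  rw [← Bool.not_eq_true, pvLt_iff]
  omega

-- insertion into a pvLt-sorted list keeps it pvLt-sorted
theorem pv_insertBy_pairwise (k1 k2 : Int → Int) (x : Int) (ys : List Int)
    (h : ys.Pairwise (fun a b => pvLt k1 k2 b a = false)) :
    (PySem.List.insertBy (pvLt k1 k2) x ys).Pairwise (fun a b => pvLt k1 k2 b a = false) := by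
  induction ys with
  | nil => simp [PySem.List.insertBy]
  | cons y t ih =>
    rw [List.pairwise_cons] at h
    rw [pv_insertBy_cons]
    split_ifs with hb
    · rw [pvLt_iff] at hb
      constructor
      · intro z hz
        rcases List.mem_cons.mp hz with hz | hz
        · subst hz; rw [pvLt_false_iff]; omega
        · have hzy := h.1 z hz
          rw [pvLt_false_iff] at hzy ⊢
          omega
      · exact List.pairwise_cons.mpr h
    · rw [Bool.not_eq_true] at hb
      constructor
      · intro z hz
        rcases (PySem.List.mem_insertBy _ _ _ _).mp hz with hz | hz
        · subst hz; exact hb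
        · exact h.1 z hz
      · exact ih h.2

-- the whole insertion sort is pvLt-sorted
theorem pv_foldl_insertBy_pairwise (k1 k2 : Int → Int) : ∀ (xs acc : List Int),
    acc.Pairwise (fun a b => pvLt k1 k2 b a = false) →
    (xs.foldl (fun acc x => PySem.List.insertBy (pvLt k1 k2) x acc) acc).Pairwise
      (fun a b => pvLt k1 k2 b a = false) := by
  intro xs
  induction xs with
  | nil => intro acc h; simpa using h
  | cons x t ih => intro acc h; exact ih _ (pv_insertBy_pairwise k1 k2 x acc h)

-- B's sorted2 result is THE pvLt-sorted permutation of its pool (keys antisymmetric)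
theorem pv_sorted2_eq_target (k1 k2 : Int → Int) (pool target : List Int)
    (hanti : ∀ a b : Int, pvLt k1 k2 b a = false → pvLt k1 k2 a b = false → a = b)
    (hpair : target.Pairwise (fun a b => pvLt k1 k2 b a = false))
    (hperm : target.Perm pool) :
    PySem.List.sorted2 pool k1 k2 false = target := by
  rw [pv_sorted2_eq_foldl]
  refine List.Perm.eq_of_pairwise (le := fun a b => pvLt k1 k2 b a = false)
    (fun a b _ _ h1 h2 => hanti a b h1 h2) ?_ hpair ?_
  · exact pv_foldl_insertBy_pairwise k1 k2 pool [] (by simp)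
  · exact (PySem.List.foldl_insertBy_perm _ pool []).trans hperm.symm

-- the composite key is antisymmetric when the two ranks are the distinct values 1 and 2
theorem pv_key_anti (cf ur dr : Int) (h1 : 1 ≤ ur) (h2 : 1 ≤ dr) (hne : ur ≠ dr) :
    ∀ a b : Int, pvLt (pvRank cf ur dr) (pvVal cf) b a = false →
      pvLt (pvRank cf ur dr) (pvVal cf) a b = false → a = b := by
  intro a b ha hb
  rw [pvLt_false_iff] at ha hb
  unfold pvRank pvVal at ha hb
  split_ifs at ha hb <;> omega

-- key-order obligations, one per pair of output zones
theorem pv_ob_up_up (cf ur dr a b : Int) (ha : cf < a) (hb : cf < b) (hab : a ≤ b) :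
    pvLt (pvRank cf ur dr) (pvVal cf) b a = false := by
  rw [pvLt_false_iff]; unfold pvRank pvVal; split_ifs <;> omega

theorem pv_ob_down_down (cf ur dr a b : Int) (ha : a < cf) (hb : b < cf) (hab : b ≤ a) :
    pvLt (pvRank cf ur dr) (pvVal cf) b a = false := by
  rw [pvLt_false_iff]; unfold pvRank pvVal; split_ifs <;> omega

theorem pv_ob_piv (cf ur dr b : Int) (h1 : 1 ≤ ur) (h2 : 1 ≤ dr) (hb : b ≠ cf) :
    pvLt (pvRank cf ur dr) (pvVal cf) b cf = false := by
  rw [pvLt_false_iff]; unfold pvRank pvVal; split_ifs <;> omega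

theorem pv_ob_up_down (cf a b : Int) (ha : cf < a) (hb : b < cf) :
    pvLt (pvRank cf 1 2) (pvVal cf) b a = false := by
  rw [pvLt_false_iff]; unfold pvRank pvVal; split_ifs <;> omega

theorem pv_ob_down_up (cf a b : Int) (ha : a < cf) (hb : cf < b) :
    pvLt (pvRank cf 2 1) (pvVal cf) b a = false := by
  rw [pvLt_false_iff]; unfold pvRank pvVal; split_ifs <;> omega

-- disjoint filters concatenated are a permutation of the joint filter
theorem pv_filter_append_perm (p q : Int → Bool) (hpq : ∀ x, ¬(p x = true ∧ q x = true)) :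
    ∀ (l : List Int), (l.filter p ++ l.filter q).Perm (l.filter (fun x => p x || q x)) := by
  intro l
  induction l with
  | nil => simp
  | cons x t ih =>
    by_cases hp : p x = true
    · have hq : q x = false := by
        cases hq : q x
        · rfl
        · exact absurd ⟨hp, hq⟩ (hpq x)
      simpa [hp, hq] using ih.cons x
    · rw [Bool.not_eq_true] at hp
      by_cases hq : q x = true
      · simp only [List.filter_cons, hp, hq, Bool.false_or, if_true]
        exact (List.perm_middle).trans (ih.cons x)
      · rw [Bool.not_eq_true] at hq
        simpa [hp, hq] using ih

-- the up- and down-groups together are the non-pivot requests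
theorem pv_groups_perm (rf : List Int) (cf : Int) (S : List Int) (hSperm : S.Perm rf) :
    ((S.filter (fun x => decide (cf < x))) ++ (S.filter (fun x => decide (x < cf)))).Perm
      (rf.filter (fun f => decide (f ≠ cf))) := by
  have h1 := pv_filter_append_perm (fun x => decide (cf < x)) (fun x => decide (x < cf))
    (by intro x; simp only [decide_eq_true_eq]; omega) S
  have h2 : ∀ x : Int, (decide (cf < x) || decide (x < cf)) = decide (x ≠ cf) := by
    intro x
    by_cases h : x = cf
    · subst h; simp
    · simp only [h, ne_eq, not_false_eq_true, decide_true, Bool.or_eq_true, decide_eq_true_eq]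
      omega
  simp only [h2] at h1
  exact h1.trans (hSperm.filter _)

-- assemble the target permutation: pivot block, two groups, in either order
theorem pv_assemble_perm (piv g1 g2 U D pool0 : List Int)
    (hg : (g1 = U ∧ g2 = D.reverse) ∨ (g1 = D.reverse ∧ g2 = U))
    (hUD : (U ++ D).Perm pool0) :
    ((piv ++ g1) ++ g2).Perm (pool0 ++ piv) := by
  have hg12 : (g1 ++ g2).Perm pool0 := by
    rcases hg with ⟨rfl, rfl⟩ | ⟨rfl, rfl⟩
    · exact (List.Perm.append_left g1 (List.reverse_perm D)).trans hUD
    · exact (List.perm_append_comm.trans (List.Perm.append_left g2 (List.reverse_perm D))).trans hUD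
  rw [List.append_assoc]
  exact (hg12.append_left piv).trans List.perm_append_comm

-- assemble the target pairwise proof from per-zone obligations
theorem pv_pairwise_assemble (P : Int → Int → Prop) (piv g1 g2 : List Int)
    (hpp : piv.Pairwise P) (h1 : g1.Pairwise P) (h2 : g2.Pairwise P)
    (hp1 : ∀ a ∈ piv, ∀ b ∈ g1, P a b) (hp2 : ∀ a ∈ piv, ∀ b ∈ g2, P a b)
    (h12 : ∀ a ∈ g1, ∀ b ∈ g2, P a b) :
    ((piv ++ g1) ++ g2).Pairwise P := by
  rw [List.pairwise_append, List.pairwise_append]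
  refine ⟨⟨hpp, h1, hp1⟩, h2, ?_⟩
  intro a ha b hb
  rcases List.mem_append.mp ha with ha | ha
  · exact hp2 a ha b hb
  · exact h12 a ha b hb

-- the main equality, with the claim's Dom hypothesis dropped (it is not needed)
theorem pv_arrange_eq (rf : List Int) (cf : Int) :
    arrange_requests rf cf = arrange_requests_alt rf cf := by
  unfold arrange_requests arrange_requests_alt
  simp only [gt_iff_lt, pv_loop_eq, List.nil_append, PySem.List.slice?_none_none_neg_one,
    Option.getD_some, pv_count_eq, zero_add]
  set S := PySem.List.sorted rf (fun x => x) false with hS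
  set U := S.filter (fun x => decide (cf < x)) with hUdef
  set D := S.filter (fun x => decide (x < cf)) with hDdef
  set pool0 := rf.filter (fun f => decide (f ≠ cf)) with hpool0
  set piv := (if rf.contains cf then [cf] else ([] : List Int)) with hpiv
  have hSp : S.Pairwise (fun a b : Int => a ≤ b) := PySem.List.sorted_pairwise rf (fun x => x)
  have hSperm : S.Perm rf := PySem.List.sorted_perm rf (fun x => x) false
  have hUlen : U.length = (rf.filter (fun f => decide (cf < f))).length :=
    (hSperm.filter _).length_eq
  have hDlen : D.length = (rf.filter (fun f => decide (f < cf))).length :=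
    (hSperm.filter _).length_eq
  have hUD : (U ++ D).Perm pool0 := pv_groups_perm rf cf S hSperm
  have hpool : (if rf.contains cf then pool0 ++ [cf] else pool0) = pool0 ++ piv := by
    by_cases hm : cf ∈ rf <;> simp [hpiv, hm]
  have hmem_piv : ∀ a ∈ piv, a = cf := by
    by_cases hm : cf ∈ rf <;> simp [hpiv, hm]
  have hmem_U : ∀ a ∈ U, cf < a := by
    intro a ha
    exact of_decide_eq_true (List.mem_filter.mp ha).2
  have hmem_D : ∀ a ∈ D, a < cf := by
    intro a ha
    exact of_decide_eq_true (List.mem_filter.mp ha).2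
  have hpivP : ∀ (P : Int → Int → Prop), piv.Pairwise P := by
    intro P
    by_cases hm : cf ∈ rf <;> simp [hpiv, hm]
  by_cases hc : D.length < U.length
  · have hc' : ((rf.filter (fun f => decide (f < cf))).length : Int)
        < ((rf.filter (fun f => decide (cf < f))).length : Int) := by
      rw [← hUlen, ← hDlen]; exact_mod_cast hc
    rw [if_pos hc, if_pos hc']
    refine (pv_sorted2_eq_target (pvRank cf (1, 2).1 (1, 2).2) (pvVal cf) _ _
      ?_ ?_ ?_).symm
    · exact pv_key_anti cf 1 2 (by norm_num) (by norm_num) (by norm_num)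
    · refine pv_pairwise_assemble _ piv U D.reverse (hpivP _) ?_ ?_ ?_ ?_ ?_
      · rw [hUdef, List.pairwise_filter]
        refine hSp.imp ?_
        intro a b hab ha hb
        exact pv_ob_up_up cf 1 2 a b (of_decide_eq_true ha) (of_decide_eq_true hb) hab
      · rw [List.pairwise_reverse, hDdef, List.pairwise_filter]
        refine hSp.imp ?_
        intro a b hab ha hb
        exact pv_ob_down_down cf 1 2 b a (of_decide_eq_true hb) (of_decide_eq_true ha) hab
      · intro a ha b hb
        rw [hmem_piv a ha]
        exact pv_ob_piv cf 1 2 b (by norm_num) (by norm_num) (by have := hmem_U b hb; omega)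
      · intro a ha b hb
        rw [hmem_piv a ha]
        exact pv_ob_piv cf 1 2 b (by norm_num) (by norm_num)
          (by have := hmem_D b (List.mem_reverse.mp hb); omega)
      · intro a ha b hb
        exact pv_ob_up_down cf a b (hmem_U a ha) (hmem_D b (List.mem_reverse.mp hb))
    · rw [hpool]
      exact pv_assemble_perm piv U D.reverse U D pool0 (Or.inl ⟨rfl, rfl⟩) hUD
  · have hc' : ¬ (((rf.filter (fun f => decide (f < cf))).length : Int)
        < ((rf.filter (fun f => decide (cf < f))).length : Int)) := by
      rw [← hUlen, ← hDlen]; exact_mod_cast hc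
    rw [if_neg hc, if_neg hc']
    refine (pv_sorted2_eq_target (pvRank cf (2, 1).1 (2, 1).2) (pvVal cf) _ _
      ?_ ?_ ?_).symm
    · exact pv_key_anti cf 2 1 (by norm_num) (by norm_num) (by norm_num)
    · refine pv_pairwise_assemble _ piv D.reverse U (hpivP _) ?_ ?_ ?_ ?_ ?_
      · rw [List.pairwise_reverse, hDdef, List.pairwise_filter]
        refine hSp.imp ?_
        intro a b hab ha hb
        exact pv_ob_down_down cf 2 1 b a (of_decide_eq_true hb) (of_decide_eq_true ha) hab
      · rw [hUdef, List.pairwise_filter]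
        refine hSp.imp ?_
        intro a b hab ha hb
        exact pv_ob_up_up cf 2 1 a b (of_decide_eq_true ha) (of_decide_eq_true hb) hab
      · intro a ha b hb
        rw [hmem_piv a ha]
        exact pv_ob_piv cf 2 1 b (by norm_num) (by norm_num)
          (by have := hmem_D b (List.mem_reverse.mp hb); omega)
      · intro a ha b hb
        rw [hmem_piv a ha]
        exact pv_ob_piv cf 2 1 b (by norm_num) (by norm_num) (by have := hmem_U b hb; omega)
      · intro a ha b hb
        exact pv_ob_down_up cf a b (hmem_D a (List.mem_reverse.mp ha)) (hmem_U b hb)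
    · rw [hpool]
      exact pv_assemble_perm piv D.reverse U U D pool0 (Or.inr ⟨rfl, rfl⟩) hUD

-- ===== VERDICT (by name: the statement is the Claim_ definition above) =====
theorem arrange_requests_spec : Claim_equal_arrange_requests := by
  intro rf cf _
  unfold Spec_arrange_requests
  exact pv_arrange_eq rf cf
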